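-- pv_equiv track=rewrite | github.com/zhenghaohui/tyan | tyan_cxx_parser/tyan_cxx_parser.py | _extract_param_from_line
-- ===== SOURCE A (Python) =====
-- PARAM_CHAR_SET = {
--     'a', 'b', 'c', 'd', 'e', 'f', 'g', 'h', 'i', 'j', 'k', 'l', 'm',
--     'n', 'o', 'p', 'q', 'r', 's', 't', 'u', 'v', 'w', 'x', 'y', 'z',
--     'A', 'B', 'C', 'D', 'E', 'F', 'G', 'H', 'I', 'J', 'K', 'L', 'M',
--     'N', 'O', 'P', 'Q', 'R', 'S', 'T', 'U', 'V', 'W', 'X', 'Y', 'Z',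
--     '0', '1', '2', '3', '4', '5', '6', '7', '8', '9', '_', '.', '[', ']'
-- }
--
-- def _extract_param_from_line(line: str) -> str:
--     line = line[:line.find("=")] # left part
--     line = line[::-1] # reverse
--     line += ' '
--     cur = 0
--     while cur + 1 < len(line) and line[cur] not in PARAM_CHAR_SET: # drop others
--         cur += 1
--         continue
--     result = ""
--     while cur + 1 < len(line):
--         if line[cur] in PARAM_CHAR_SET: # collect
--             result += line[cur]
--             cur += 1
--             continue
--         if line[cur:cur+2] == '>-':  # due to reversed
--             result += line[cur:cur+2]
--             cur += 2
--             continue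
--         break
--     result = result[::-1] # reverse back
--     return result
-- ===== SOURCE B (Python) =====
-- PARAM_CHARS = frozenset(
--     "abcdefghijklmnopqrstuvwxyzABCDEFGHIJKLMNOPQRSTUVWXYZ0123456789_.[]")
--
--
-- def _extract_param_from_line(line: str) -> str:
--     left = line[:line.find("=")]
--     best = run = pend = ""
--     dash = False
--     for c in left:
--         if dash:
--             dash = False
--             if c == '>':
--                 pend += "->"
--                 continue
--             run = pend = ""
--         if c in PARAM_CHARS:
--             run += pend + c
--             pend = ""
--             best = run
--         elif c == '-':
--             dash = True
--         else:
--             run = pend = ""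
--     return best
-- ===== Notes on version B (the rewrite author's own statement) =====
-- stated objective: alternative
-- what changed: Replaces the reverse-the-string-then-scan-with-index-arithmetic-and-sentinel approach by a single forward left-to-right state-machine pass (run/pending-arrow/dash state, remembering the last run that ended in a parameter character), with no reversal, no sentinel character and no index juggling.
import Mathlib
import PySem

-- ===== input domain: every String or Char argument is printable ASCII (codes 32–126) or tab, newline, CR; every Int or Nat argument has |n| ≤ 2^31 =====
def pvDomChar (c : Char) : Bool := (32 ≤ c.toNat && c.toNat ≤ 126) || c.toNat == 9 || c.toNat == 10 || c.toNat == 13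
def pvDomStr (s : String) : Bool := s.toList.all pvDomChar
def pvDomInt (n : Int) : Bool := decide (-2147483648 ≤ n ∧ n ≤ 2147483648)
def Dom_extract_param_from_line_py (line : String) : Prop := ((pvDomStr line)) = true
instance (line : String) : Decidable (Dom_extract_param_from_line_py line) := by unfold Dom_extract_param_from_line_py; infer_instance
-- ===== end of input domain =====

-- B replaces A's reverse-and-index-scan (with appended sentinel) by a single forward
-- state-machine pass over the left part; same return value (alternative decomposition).

-- ===== PORT A =====
-- PARAM_CHAR_SET membership (shared constant of the module, used by both programs)
def pvParamChars : List Char :=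
  "abcdefghijklmnopqrstuvwxyzABCDEFGHIJKLMNOPQRSTUVWXYZ0123456789_.[]".toList

def pvIsParam (c : Char) : Bool := pvParamChars.contains c

-- first while loop: advance cur while cur+1 < len and line[cur] not in the set
def pvSkipA : List Char → List Char
  | [] => []
  | [c] => [c]
  | c :: c2 :: cs => if pvIsParam c then c :: c2 :: cs else pvSkipA (c2 :: cs)
termination_by structural l => l

-- second while loop: collect param chars and reversed-arrow pairs '>-', else break
def pvCollectA : List Char → List Char
  | [] => []
  | [_] => []
  | c :: c2 :: cs =>
    if pvIsParam c then c :: pvCollectA (c2 :: cs)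
    else if c = '>' && c2 = '-' then c :: c2 :: pvCollectA cs
    else []
termination_by structural l => l

def extract_param_from_line_py (line : String) : String :=
  let cs := line.toList
  let left := PySem.Chars.slice cs none (some (PySem.Chars.find cs ['=']))  -- line[:line.find("=")]
  let work := left.reverse ++ [' ']                                        -- line[::-1]; line += ' '
  String.ofList ((pvCollectA (pvSkipA work)).reverse)                          -- result[::-1]

-- ===== PORT B =====
structure BSt where
  best : List Char
  run : List Char
  pend : List Char
  dash : Bool
deriving DecidableEq, Repr

-- the non-dash part of the loop body (param / '-' / other)
def pvStepCore (st : BSt) (c : Char) : BSt :=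
  if pvIsParam c then
    let run' := st.run ++ st.pend ++ [c]
    { best := run', run := run', pend := [], dash := false }
  else if c = '-' then { st with dash := true }
  else { st with run := [], pend := [] }

-- the full loop body: dash handling first, then fall through to pvStepCore
def pvStepB (st : BSt) (c : Char) : BSt :=
  if st.dash then
    if c = '>' then { st with pend := st.pend ++ ['-', '>'], dash := false }
    else pvStepCore { st with run := [], pend := [], dash := false } c
  else pvStepCore st c

def extract_param_from_line_py_alt (line : String) : String :=
  let cs := line.toList
  let left := PySem.Chars.slice cs none (some (PySem.Chars.find cs ['=']))  -- line[:line.find("=")]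
  let st := left.foldl pvStepB ⟨[], [], [], false⟩
  String.ofList st.best

-- ===== PRECONDITION & SPEC =====
def Spec_extract_param_from_line_py (line : String) (out : String) : Prop := out = extract_param_from_line_py_alt line
instance (line : String) (out : String) : Decidable (Spec_extract_param_from_line_py line out) := by unfold Spec_extract_param_from_line_py; infer_instance

-- ===== CLAIM (what is proved, stated in full; the proofs are below) =====
def Claim_equal_extract_param_from_line_py : Prop := ∀ (line : String), Dom_extract_param_from_line_py line → Spec_extract_param_from_line_py line (extract_param_from_line_py line)

-- ===== LEMMAS AND PROOFS =====

-- sentinel-free version of A's collect loop (proof device)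
def pvCollect : List Char → List Char
  | [] => []
  | [c] => if pvIsParam c then [c] else []
  | c :: c2 :: cs =>
    if pvIsParam c then c :: pvCollect (c2 :: cs)
    else if c = '>' && c2 = '-' then c :: c2 :: pvCollect cs
    else []
termination_by structural l => l

theorem pvCollectA_sentinel_aux (n : Nat) : ∀ r : List Char, r.length ≤ n →
    pvCollectA (r ++ [' ']) = pvCollect r := by
  induction n with
  | zero =>
    intro r hr
    have : r = [] := List.eq_nil_of_length_eq_zero (Nat.le_zero.mp hr)
    subst this; simp [pvCollectA, pvCollect]
  | succ n ih =>
    intro r hr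
    match r with
    | [] => simp [pvCollectA, pvCollect]
    | [c] => by_cases h : pvIsParam c = true <;> simp [pvCollectA, pvCollect, h]
    | c :: c2 :: cs =>
      have hlen : (c2 :: cs).length ≤ n := by simp at hr ⊢; omega
      by_cases h : pvIsParam c = true
      · simp only [List.cons_append, pvCollectA, pvCollect, h, if_true]
        rw [← List.cons_append, ih _ hlen]
      · by_cases h2 : (c = '>' && c2 = '-') = true
        · simp only [List.cons_append, pvCollectA, pvCollect, h, if_false, h2, if_true,
            Bool.false_eq_true]
          rw [ih cs (by simp at hr; omega)]
        · simp [pvCollectA, pvCollect, h, h2]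

theorem pvCollectA_sentinel (r : List Char) : pvCollectA (r ++ [' ']) = pvCollect r :=
  pvCollectA_sentinel_aux r.length r le_rfl

theorem pvSkip_collect (r : List Char) :
    pvCollectA (pvSkipA (r ++ [' '])) = pvCollect (r.dropWhile (fun c => !pvIsParam c)) := by
  induction r with
  | nil => simp [pvSkipA, pvCollectA, pvCollect]
  | cons c cs ih =>
    by_cases h : pvIsParam c = true
    · have hs : pvSkipA ((c :: cs) ++ [' ']) = (c :: cs) ++ [' '] := by
        cases cs <;> simp [pvSkipA, h]
      rw [hs, pvCollectA_sentinel, List.dropWhile_cons_of_neg (by simp [h])]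
    · have hs : pvSkipA ((c :: cs) ++ [' ']) = pvSkipA (cs ++ [' ']) := by
        cases cs <;> simp [pvSkipA, h]
      rw [hs, ih, List.dropWhile_cons_of_pos (by simp [h])]

theorem pvIsParam_dash : pvIsParam '-' = false := by decide
theorem pvIsParam_gt : pvIsParam '>' = false := by decide

theorem pvCollect_cons_param (c : Char) (r : List Char) (h : pvIsParam c = true) :
    pvCollect (c :: r) = c :: pvCollect r := by
  cases r with
  | nil => simp [pvCollect, h]
  | cons d ds => simp [pvCollect, h]

theorem pvCollect_cons_junk (c : Char) (r : List Char) (h : pvIsParam c = false)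
    (hr : c ≠ '>' ∨ r.head? ≠ some '-') : pvCollect (c :: r) = [] := by
  cases r with
  | nil => simp [pvCollect, h]
  | cons d ds =>
    have : (c = '>' && d = '-') = false := by
      rcases hr with hr | hr
      · simp [hr]
      · simp at hr; simp [hr]
    simp [pvCollect, h, this]

theorem pvCollect_dash_head (t : List Char) : pvCollect ('-' :: t) = [] :=
  pvCollect_cons_junk '-' t pvIsParam_dash (Or.inl (by decide))

theorem pvCollect_arrow (t : List Char) :
    pvCollect ('>' :: '-' :: t) = '>' :: '-' :: pvCollect t := by
  simp [pvCollect, pvIsParam_gt]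

-- the loop invariant of B's forward pass, phrased over the reverse of the consumed prefix
def pvInv (l : List Char) (st : BSt) : Prop :=
  (st.dash = false →
    (pvCollect l.reverse).reverse = st.run ++ st.pend ∧ l.reverse.head? ≠ some '-')
  ∧ (st.dash = true →
    ∃ t, l.reverse = '-' :: t ∧ (pvCollect t).reverse = st.run ++ st.pend)
  ∧ st.best = (pvCollect (l.reverse.dropWhile (fun c => !pvIsParam c))).reverse

theorem pvInv_step (l : List Char) (st : BSt) (c : Char) (h : pvInv l st) :
    pvInv (l ++ [c]) (pvStepB st c) := by
  obtain ⟨hF, hT, hB⟩ := h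
  have hrev : (l ++ [c]).reverse = c :: l.reverse := by simp
  cases hdash : st.dash with
  | false =>
    obtain ⟨hrun, hhead⟩ := hF hdash
    by_cases hp : pvIsParam c = true
    · -- param char: start/extend the run, record it as best
      have hcd : c ≠ '-' := fun hc => by rw [hc, pvIsParam_dash] at hp; cases hp
      have hst : pvStepB st c =
          ⟨st.run ++ st.pend ++ [c], st.run ++ st.pend ++ [c], [], false⟩ := by
        simp [pvStepB, pvStepCore, hdash, hp]
      rw [hst]
      refine ⟨fun _ => ⟨?_, ?_⟩, fun hco => by simp at hco, ?_⟩
      · rw [hrev, pvCollect_cons_param c l.reverse hp]; simp [hrun]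
      · rw [hrev]; simp [hcd]
      · rw [hrev]
        simp [hp, pvCollect_cons_param c l.reverse hp, hrun]
    · by_cases hc : c = '-'
      · -- dash seen
        subst hc
        have hst : pvStepB st '-' = ⟨st.best, st.run, st.pend, true⟩ := by
          simp [pvStepB, pvStepCore, hdash, pvIsParam_dash]
        rw [hst]
        refine ⟨fun hco => by simp at hco, fun _ => ⟨l.reverse, hrev, hrun⟩, ?_⟩
        rw [hrev]; simp [pvIsParam_dash, hB]
      · -- other junk: reset the run
        have hz : pvCollect (c :: l.reverse) = [] :=
          pvCollect_cons_junk c l.reverse (by simpa using hp)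
            (if hgt : c = '>' then Or.inr hhead else Or.inl hgt)
        have hst : pvStepB st c = ⟨st.best, [], [], false⟩ := by
          simp [pvStepB, pvStepCore, hdash, hp, hc]
        rw [hst]
        refine ⟨fun _ => ⟨?_, ?_⟩, fun hco => by simp at hco, ?_⟩
        · rw [hrev, hz]; simp
        · rw [hrev]; simp [hc]
        · rw [hrev]; simp [hp, hB]
  | true =>
    obtain ⟨t, hlt, hrun⟩ := hT hdash
    have hB' : st.best = (pvCollect (t.dropWhile (fun c => !pvIsParam c))).reverse := by
      rw [hB, hlt]; simp [pvIsParam_dash]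
    by_cases hgt : c = '>'
    · -- completed '->': goes to pend
      subst hgt
      have hst : pvStepB st '>' = ⟨st.best, st.run, st.pend ++ ['-', '>'], false⟩ := by
        simp [pvStepB, hdash]
      rw [hst]
      refine ⟨fun _ => ⟨?_, ?_⟩, fun hco => by simp at hco, ?_⟩
      · rw [hrev, hlt, pvCollect_arrow]; simp [hrun]
      · rw [hrev]; simp
      · rw [hrev, hlt]
        simp [pvIsParam_gt, pvIsParam_dash, hB']
    · by_cases hp : pvIsParam c = true
      · -- dangling '-' killed the run; param char starts a fresh run
        have hcd : c ≠ '-' := fun hc => by rw [hc, pvIsParam_dash] at hp; cases hp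
        have hst : pvStepB st c = ⟨[c], [c], [], false⟩ := by
          simp [pvStepB, pvStepCore, hdash, hgt, hp]
        rw [hst]
        refine ⟨fun _ => ⟨?_, ?_⟩, fun hco => by simp at hco, ?_⟩
        · rw [hrev, hlt, pvCollect_cons_param c ('-' :: t) hp, pvCollect_dash_head]; simp
        · rw [hrev]; simp [hcd]
        · rw [hrev, hlt]
          simp [hp,
            pvCollect_cons_param c ('-' :: t) hp, pvCollect_dash_head]
      · by_cases hc : c = '-'
        · -- another dash
          subst hc
          have hst : pvStepB st '-' = ⟨st.best, [], [], true⟩ := by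
            simp [pvStepB, pvStepCore, hdash, hgt, pvIsParam_dash]
          rw [hst]
          refine ⟨fun hco => by simp at hco,
            fun _ => ⟨'-' :: t, by rw [hrev, hlt], by rw [pvCollect_dash_head]; simp⟩, ?_⟩
          rw [hrev]; simp [pvIsParam_dash, hB]
        · -- junk after dangling '-': everything resets
          have hz : pvCollect (c :: '-' :: t) = [] :=
            pvCollect_cons_junk c ('-' :: t) (by simpa using hp) (Or.inl hgt)
          have hst : pvStepB st c = ⟨st.best, [], [], false⟩ := by
            simp [pvStepB, pvStepCore, hdash, hgt, hp, hc]
          rw [hst]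
          refine ⟨fun _ => ⟨?_, ?_⟩, fun hco => by simp at hco, ?_⟩
          · rw [hrev, hlt, hz]; simp
          · rw [hrev]; simp [hc]
          · rw [hrev]; simp [hp, hB]

theorem pvInv_foldl (l : List Char) : pvInv l (l.foldl pvStepB ⟨[], [], [], false⟩) := by
  induction l using List.reverseRecOn with
  | nil =>
    exact ⟨fun _ => ⟨by simp [pvCollect], by simp⟩, fun hco => by simp at hco, by simp [pvCollect]⟩
  | append_singleton l c ih =>
    rw [List.foldl_append]
    exact pvInv_step l _ c ih

theorem pvMain (l : List Char) :
    (pvCollectA (pvSkipA (l.reverse ++ [' ']))).reverse =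
      (l.foldl pvStepB ⟨[], [], [], false⟩).best := by
  rw [pvSkip_collect, (pvInv_foldl l).2.2]

-- ===== VERDICT (by name: the statement is the Claim_ definition above) =====
theorem extract_param_from_line_py_spec : Claim_equal_extract_param_from_line_py := by
  intro line _
  unfold Spec_extract_param_from_line_py extract_param_from_line_py extract_param_from_line_py_alt
  dsimp only
  rw [pvMain]
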